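-- pv_equiv track=rewrite | github.com/YijiangPang/Template-repo-for-deep-learning-tasks | Tools/Plot/Utils/plot_utils.py | filter
-- ===== SOURCE A (Python) =====
-- def filter(record_dic, filter_settings):
--     record_dic_temp = {}
--     keys = list(filter_settings.keys())
--     d_exist = list(record_dic.keys())
--     if len(filter_settings[keys[0]]) == 0: filter_settings[keys[0]] = d_exist
--     filter_dataset = list(set([i for i in filter_settings[keys[0]] if i in d_exist]) & set(d_exist))
--     for d in sorted(filter_dataset):
--         record_dic_temp[d] = {}
--         b_exist = list(record_dic[d].keys())
--         if len(filter_settings[keys[1]]) == 0: filter_settings[keys[1]] = b_exist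
--         filter_backbone = list(set([i for i in filter_settings[keys[1]] if i in b_exist]) & set(b_exist))
--         for b in sorted(filter_backbone):
--             record_dic_temp[d][b] = {}
--             o_exist = list(record_dic[d][b].keys())
--             # if len(filter_settings[keys[2]]) == 0: filter_settings[keys[2]] = o_exist
--             filter_settings[keys[2]] = o_exist #disable opt filter
--             filter_optmizer = list(set([i for i in filter_settings[keys[2]] if i in o_exist]) & set(o_exist))
--             for o in sorted(filter_optmizer):
--                 record_dic_temp[d][b][o] = {}
--                 l_exist = list(record_dic[d][b][o].keys())
--                 if len(filter_settings[keys[3]]) == 0: filter_settings[keys[3]] = l_exist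
--                 filter_lr = list(set([i for i in filter_settings[keys[3]] if i in l_exist]) & set(l_exist))
--                 for l in sorted(filter_lr, reverse = True):
--                     record_dic_temp[d][b][o][l] = record_dic[d][b][o][l]
--     return record_dic_temp
-- ===== SOURCE B (Python) =====
-- def filter(record_dic, filter_settings):
--     # Returns the same value as the original; does NOT mutate filter_settings
--     # (it threads its updates through a private copy instead).
--     fs = dict(filter_settings)
--     keys = list(fs.keys())
--
--     def helper(sub, level):
--         exist = list(sub.keys())
--         if level == 2:
--             fs[keys[2]] = exist
--         elif not fs[keys[level]]:
--             fs[keys[level]] = exist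
--         chosen = sorted({i for i in fs[keys[level]] if i in exist},
--                         reverse=(level == 3))
--         if level == 3:
--             return {k: sub[k] for k in chosen}
--         return {k: helper(sub[k], level + 1) for k in chosen}
--
--     return helper(record_dic, 0)
-- ===== Notes on version B (the rewrite author's own statement) =====
-- stated objective: simpler
-- what changed: A's four hand-unrolled nested loops (one copy of the filter/force/sort logic per level) become one recursive helper over the nesting depth with a single shared per-level rule, and the redundant '& set(exist)' intersection is dropped; B threads the settings updates through a private copy instead of mutating the caller's filter_settings.
import Mathlib
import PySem

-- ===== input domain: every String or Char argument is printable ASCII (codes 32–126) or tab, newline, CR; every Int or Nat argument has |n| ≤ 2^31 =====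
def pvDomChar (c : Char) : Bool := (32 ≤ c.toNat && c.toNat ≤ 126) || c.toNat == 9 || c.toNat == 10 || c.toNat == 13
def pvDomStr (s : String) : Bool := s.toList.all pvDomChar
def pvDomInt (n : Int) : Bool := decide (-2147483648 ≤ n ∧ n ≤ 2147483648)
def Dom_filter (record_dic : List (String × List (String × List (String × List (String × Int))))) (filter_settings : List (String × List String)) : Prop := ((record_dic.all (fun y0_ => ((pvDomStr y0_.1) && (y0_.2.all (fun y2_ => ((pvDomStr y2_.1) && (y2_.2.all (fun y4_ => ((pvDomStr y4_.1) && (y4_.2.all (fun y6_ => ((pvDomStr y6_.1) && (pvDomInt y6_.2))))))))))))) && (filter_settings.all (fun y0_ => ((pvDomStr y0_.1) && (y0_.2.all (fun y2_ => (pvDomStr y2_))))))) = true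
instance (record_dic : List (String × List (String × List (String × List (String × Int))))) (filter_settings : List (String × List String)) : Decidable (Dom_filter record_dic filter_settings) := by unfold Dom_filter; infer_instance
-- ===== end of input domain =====

-- B replaces A's four hand-unrolled nested loops by one uniform per-level rule (shared
-- `bStep`) applied recursively down the nesting; same return value. Side effects differ:
-- A mutates `filter_settings` in place, B threads its updates through a private copy —
-- the equivalence proved here is about the RETURN value only.

abbrev pvT3 := List (String × Int)
abbrev pvT2 := List (String × pvT3)
abbrev pvT1 := List (String × pvT2)
abbrev pvT0 := List (String × pvT1)
abbrev pvFS := PySem.Dict String (List String)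

-- ===== PORT A =====
-- A-side helpers: one definition per `for` loop body of A, transliterated line by line.
-- A's innermost `record_dic_temp[d][b][o][l] = record_dic[d][b][o][l]`:
def aLoopL (rdo : PySem.Dict String Int) (tmp : pvT3) (l : String) : pvT3 :=
  tmp ++ [(l, rdo.getD l 0)]

-- A's `for o in sorted(filter_optmizer)` body (state = (record_dic_temp[d][b] so far, filter_settings)):
def aLoopO (keys : List String) (rdb : PySem.Dict String pvT3) (st : pvT2 × pvFS) (o : String) : pvT2 × pvFS :=
  let fs := st.2
  let rdo := PySem.Dict.ofList (rdb.getD o [])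
  let l_exist := rdo.keys
  let k3 := PySem.List.pyGetD keys 3 ""
  let fs := if PySem.List.len (fs.getD k3 []) == 0 then fs.insert k3 l_exist else fs
  let filter_lr := PySem.Set.inter (PySem.Set.ofList ((fs.getD k3 []).filter (fun i => l_exist.contains i))) (PySem.Set.ofList l_exist)
  (st.1 ++ [(o, (PySem.List.sorted filter_lr (fun x => x) true).foldl (aLoopL rdo) [])], fs)

-- A's `for b in sorted(filter_backbone)` body:
def aLoopB (keys : List String) (rdd : PySem.Dict String pvT2) (st : pvT1 × pvFS) (b : String) : pvT1 × pvFS :=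
  let fs := st.2
  let rdb := PySem.Dict.ofList (rdd.getD b [])
  let o_exist := rdb.keys
  let k2 := PySem.List.pyGetD keys 2 ""
  let fs := fs.insert k2 o_exist   -- `filter_settings[keys[2]] = o_exist  # disable opt filter`
  let filter_optmizer := PySem.Set.inter (PySem.Set.ofList ((fs.getD k2 []).filter (fun i => o_exist.contains i))) (PySem.Set.ofList o_exist)
  let inner := (PySem.List.sorted filter_optmizer (fun x => x) false).foldl (aLoopO keys rdb) ([], fs)
  (st.1 ++ [(b, inner.1)], inner.2)

-- A's `for d in sorted(filter_dataset)` body: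
def aLoopD (keys : List String) (rd : PySem.Dict String pvT1) (st : pvT0 × pvFS) (d : String) : pvT0 × pvFS :=
  let fs := st.2
  let rdd := PySem.Dict.ofList (rd.getD d [])
  let b_exist := rdd.keys
  let k1 := PySem.List.pyGetD keys 1 ""
  let fs := if PySem.List.len (fs.getD k1 []) == 0 then fs.insert k1 b_exist else fs
  let filter_backbone := PySem.Set.inter (PySem.Set.ofList ((fs.getD k1 []).filter (fun i => b_exist.contains i))) (PySem.Set.ofList b_exist)
  let inner := (PySem.List.sorted filter_backbone (fun x => x) false).foldl (aLoopB keys rdd) ([], fs)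
  (st.1 ++ [(d, inner.1)], inner.2)

def filter (record_dic : List (String × List (String × List (String × List (String × Int))))) (filter_settings : List (String × List String)) : List (String × List (String × List (String × List (String × Int)))) :=
  let rd := PySem.Dict.ofList record_dic
  let fs := PySem.Dict.ofList filter_settings
  let keys := fs.keys
  let d_exist := rd.keys
  let k0 := PySem.List.pyGetD keys 0 ""
  let fs := if PySem.List.len (fs.getD k0 []) == 0 then fs.insert k0 d_exist else fs
  let filter_dataset := PySem.Set.inter (PySem.Set.ofList ((fs.getD k0 []).filter (fun i => d_exist.contains i))) (PySem.Set.ofList d_exist)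
  ((PySem.List.sorted filter_dataset (fun x => x) false).foldl (aLoopD keys rd) ([], fs)).1

-- ===== PORT B =====
-- B-side helpers: Source B's `helper(sub, level)` has one uniform per-level rule — update the
-- settings entry (forced at level 2, only-if-empty otherwise), then take the chosen keys
-- sorted (descending at the leaf).  The recursion is level-indexed, so its four instances
-- bGo0..bGo3 are written out (the `if level == …` dispatch is resolved statically by the
-- nesting type); the shared rule lives in bSetIfEmpty / bChosen.
def bSetIfEmpty (fs : pvFS) (k : String) (exist : List String) : pvFS :=
  if PySem.List.len (fs.getD k []) == 0 then fs.insert k exist else fs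

def bChosen (fs : pvFS) (k : String) (exist : List String) (rev : Bool) : List String :=
  PySem.List.sorted (PySem.Set.ofList ((fs.getD k []).filter (fun i => exist.contains i))) (fun x => x) rev

def bGo3 (fs : pvFS) (keys : List String) (sub : pvT3) : pvFS × pvT3 :=
  let d := PySem.Dict.ofList sub
  let k := PySem.List.pyGetD keys 3 ""
  let fs := bSetIfEmpty fs k d.keys
  (fs, (bChosen fs k d.keys true).map (fun l => (l, d.getD l 0)))

def bGo2 (fs : pvFS) (keys : List String) (sub : pvT2) : pvFS × pvT2 :=
  let d := PySem.Dict.ofList sub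
  let k := PySem.List.pyGetD keys 2 ""
  let fs := fs.insert k d.keys        -- level 2 is forced unconditionally
  (bChosen fs k d.keys false).foldl
    (fun st o => ((bGo3 st.1 keys (d.getD o [])).1, st.2 ++ [(o, (bGo3 st.1 keys (d.getD o [])).2)])) (fs, [])

def bGo1 (fs : pvFS) (keys : List String) (sub : pvT1) : pvFS × pvT1 :=
  let d := PySem.Dict.ofList sub
  let k := PySem.List.pyGetD keys 1 ""
  let fs := bSetIfEmpty fs k d.keys
  (bChosen fs k d.keys false).foldl
    (fun st b => ((bGo2 st.1 keys (d.getD b [])).1, st.2 ++ [(b, (bGo2 st.1 keys (d.getD b [])).2)])) (fs, [])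

def filter_alt (record_dic : List (String × List (String × List (String × List (String × Int))))) (filter_settings : List (String × List String)) : List (String × List (String × List (String × List (String × Int)))) :=
  let fs := PySem.Dict.ofList filter_settings
  let keys := fs.keys
  let d := PySem.Dict.ofList record_dic
  let k := PySem.List.pyGetD keys 0 ""
  let fs := bSetIfEmpty fs k d.keys
  ((bChosen fs k d.keys false).foldl
    (fun st dd => ((bGo1 st.1 keys (d.getD dd [])).1, st.2 ++ [(dd, (bGo1 st.1 keys (d.getD dd [])).2)])) (fs, [])).2

-- ===== PRECONDITION & SPEC =====
-- Pre_ excludes EXACTLY the inputs on which Python A raises IndexError (fewer than 4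
-- distinct filter keys while the nested traversal is still alive when the missing keys[i]
-- is indexed); on every input where A returns a value Pre_ holds.  The disjuncts spell
-- out, level by level, the conditions under which the traversal dies out before the
-- missing key is reached (including the one observable mutation: with keys[1]'s entry
-- initially empty it is set to the backbone keys of the first dataset that has any).
def Pre_filter (record_dic : List (String × List (String × List (String × List (String × Int))))) (filter_settings : List (String × List String)) : Prop :=
  let fs := PySem.Dict.ofList filter_settings
  let ks := fs.keys
  let rd := PySem.Dict.ofList record_dic
  let K0 := fs.getD (PySem.List.pyGetD ks 0 "") []
  let sel0 := PySem.List.sorted (PySem.Set.ofList (if K0 = [] then rd.keys else K0.filter (fun i => rd.keys.contains i))) (fun x => x) false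
  let bkeys := fun d => (PySem.Dict.ofList (rd.getD d [])).keys
  let okeys := fun d b => (PySem.Dict.ofList ((PySem.Dict.ofList (rd.getD d [])).getD b [])).keys
  let K1 := fs.getD (PySem.List.pyGetD ks 1 "") []
  4 ≤ ks.length ∨
  (1 ≤ ks.length ∧ sel0 = []) ∨
  (2 ≤ ks.length ∧ (if K1 = [] then ∀ d ∈ sel0, bkeys d = []
                    else ∀ d ∈ sel0, ∀ i ∈ K1, i ∉ bkeys d)) ∨
  (ks.length = 3 ∧
    (if K1 = [] then
      ∀ d0 ∈ (sel0.find? (fun d => !(bkeys d).isEmpty)).toList,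
        (∀ b ∈ bkeys d0, okeys d0 b = []) ∧
        (∀ d ∈ sel0, d0 < d → ∀ b ∈ bkeys d0, b ∈ bkeys d → okeys d b = [])
     else ∀ d ∈ sel0, ∀ b ∈ K1, b ∈ bkeys d → okeys d b = []))
instance (record_dic : List (String × List (String × List (String × List (String × Int))))) (filter_settings : List (String × List String)) : Decidable (Pre_filter record_dic filter_settings) := by unfold Pre_filter; infer_instance

def pvWitness_filter : (List (String × List (String × List (String × List (String × Int))))) × (List (String × List String)) :=
  ([("m", [("b", [("o", [("x", 1)])])])], [("d", []), ("b", ["b"]), ("o", []), ("l", [])])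

def Spec_filter (record_dic : List (String × List (String × List (String × List (String × Int))))) (filter_settings : List (String × List String)) (out : List (String × List (String × List (String × List (String × Int))))) : Prop := out = filter_alt record_dic filter_settings
instance (record_dic : List (String × List (String × List (String × List (String × Int))))) (filter_settings : List (String × List String)) (out : List (String × List (String × List (String × List (String × Int))))) : Decidable (Spec_filter record_dic filter_settings out) := by
  unfold Spec_filter
  haveI h1 : DecidableEq (List (String × Int)) := inferInstance
  haveI h2 : DecidableEq (List (String × List (String × Int))) := inferInstance
  haveI h3 : DecidableEq (List (String × List (String × List (String × Int)))) := inferInstance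
  infer_instance

-- ===== CLAIM (what is proved, stated in full; the proofs are below) =====
def Claim_equal_filter : Prop := ∀ (record_dic : List (String × List (String × List (String × List (String × Int))))) (filter_settings : List (String × List String)), Dom_filter record_dic filter_settings → Pre_filter record_dic filter_settings → Spec_filter record_dic filter_settings (filter record_dic filter_settings)

-- ===== LEMMAS AND PROOFS =====

-- A's `list(set([i for i in S if i in exist]) & set(exist))` is just the first set:
-- every element of the comprehension is already in `exist`.
theorem interFilter (S exist : List String) :
    PySem.Set.inter (PySem.Set.ofList (S.filter (fun i => exist.contains i))) (PySem.Set.ofList exist)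
    = PySem.Set.ofList (S.filter (fun i => exist.contains i)) := by
  unfold PySem.Set.inter
  rw [List.filter_eq_self]
  intro a ha
  rw [PySem.Set.mem_ofList] at ha
  have : a ∈ exist := by
    have := List.of_mem_filter ha
    simpa using this
  simpa [PySem.Set.contains] using (PySem.Set.mem_ofList exist a).2 this

-- A folds (output, settings) pairs; B folds (settings, output) pairs: the two folds are
-- component-wise swaps of each other.
theorem foldAB {β : Type} (g : pvFS → String → pvFS × β) (c : List String) :
    ∀ (fs : pvFS) (t : List (String × β)),
    c.foldl (fun st o => (st.1 ++ [(o, (g st.2 o).2)], (g st.2 o).1)) (t, fs)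
    = ((c.foldl (fun st o => ((g st.1 o).1, st.2 ++ [(o, (g st.1 o).2)])) (fs, t)).2,
       (c.foldl (fun st o => ((g st.1 o).1, st.2 ++ [(o, (g st.1 o).2)])) (fs, t)).1) := by
  induction c with
  | nil => intro fs t; rfl
  | cons x xs ih => intro fs t; simp only [List.foldl_cons]; exact ih _ _

-- A's innermost loop only appends `(l, record_dic[d][b][o][l])`: it is a map.
theorem aLoopL_map (rdo : PySem.Dict String Int) (c : List String) :
    c.foldl (aLoopL rdo) [] = c.map (fun l => (l, rdo.getD l 0)) := by
  rw [show aLoopL rdo = (fun acc l => acc ++ [(l, rdo.getD l 0)]) from rfl]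
  simpa using PySem.List.foldl_append_singleton_eq_map (fun l => (l, rdo.getD l 0)) c []

theorem loopO_eq (keys : List String) (rdb : PySem.Dict String pvT3) :
    aLoopO keys rdb = fun st o =>
      (st.1 ++ [(o, (bGo3 st.2 keys (rdb.getD o [])).2)], (bGo3 st.2 keys (rdb.getD o [])).1) := by
  funext st o
  simp only [aLoopO, bGo3, bSetIfEmpty, bChosen]
  rw [interFilter]
  simp [aLoopL_map]

theorem go2_eq (keys : List String) (fs : pvFS) (sub : pvT2) :
    bGo2 fs keys sub =
      (let rdb := PySem.Dict.ofList sub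
       let o_exist := rdb.keys
       let k2 := PySem.List.pyGetD keys 2 ""
       let fs2 := fs.insert k2 o_exist
       let filter_optmizer := PySem.Set.inter (PySem.Set.ofList ((fs2.getD k2 []).filter (fun i => o_exist.contains i))) (PySem.Set.ofList o_exist)
       let r := (PySem.List.sorted filter_optmizer (fun x => x) false).foldl (aLoopO keys rdb) ([], fs2)
       (r.2, r.1)) := by
  simp only [bGo2, bChosen, loopO_eq]
  rw [interFilter, foldAB (fun fs o => bGo3 fs keys ((PySem.Dict.ofList sub).getD o []))]

theorem loopB_eq (keys : List String) (rdd : PySem.Dict String pvT2) :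
    aLoopB keys rdd = fun st b =>
      (st.1 ++ [(b, (bGo2 st.2 keys (rdd.getD b [])).2)], (bGo2 st.2 keys (rdd.getD b [])).1) := by
  funext st b
  simp [aLoopB, go2_eq]

theorem go1_eq (keys : List String) (fs : pvFS) (sub : pvT1) :
    bGo1 fs keys sub =
      (let rdd := PySem.Dict.ofList sub
       let b_exist := rdd.keys
       let k1 := PySem.List.pyGetD keys 1 ""
       let fs2 := if PySem.List.len (fs.getD k1 []) == 0 then fs.insert k1 b_exist else fs
       let filter_backbone := PySem.Set.inter (PySem.Set.ofList ((fs2.getD k1 []).filter (fun i => b_exist.contains i))) (PySem.Set.ofList b_exist)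
       let r := (PySem.List.sorted filter_backbone (fun x => x) false).foldl (aLoopB keys rdd) ([], fs2)
       (r.2, r.1)) := by
  simp only [bGo1, bSetIfEmpty, bChosen, loopB_eq]
  rw [interFilter, foldAB (fun fs b => bGo2 fs keys ((PySem.Dict.ofList sub).getD b []))]

theorem loopD_eq (keys : List String) (rd : PySem.Dict String pvT1) :
    aLoopD keys rd = fun st d =>
      (st.1 ++ [(d, (bGo1 st.2 keys (rd.getD d [])).2)], (bGo1 st.2 keys (rd.getD d [])).1) := by
  funext st d
  simp [aLoopD, go1_eq]

-- ===== VERDICT (by name: the statement is the Claim_ definition above) =====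
theorem filter_spec : Claim_equal_filter := by
  intro record_dic filter_settings _ _
  unfold Spec_filter filter filter_alt
  simp only [bSetIfEmpty, bChosen, loopD_eq]
  rw [interFilter, foldAB (fun fs d => bGo1 fs (PySem.Dict.ofList filter_settings).keys ((PySem.Dict.ofList record_dic).getD d []))]
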